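-- pv_equiv track=rewrite | github.com/DingchenZhu/vis-tvm | vis_compiler/tiling.py | _macro_w_tiles
-- ===== SOURCE A (Python) =====
-- from typing import List, Optional, Tuple
--
-- def _macro_w_tiles(w_in: int) -> List[Tuple[int, int, int]]:
--     """
--     (w_start, w_size, bas_addr_hint) for each horizontal macro tile.
--     Guide §5.1: W=256 → two 128-wide halves; bas_addr for right half uses +288 in sd_codegen.
--     Here we expose widths only; address policy lives in the emitter.
--     """
--     if w_in <= 128:
--         return [(0, w_in, 0)]
--     # Split into 128-wide chunks (documented pattern for 256-wide feature maps).
--     chunks = []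
--     start = 0
--     hint = 0
--     while start < w_in:
--         sz = min(128, w_in - start)
--         chunks.append((start, sz, hint))
--         start += sz
--         # Match sd_codegen right-half input addressing step (magic from their script).
--         hint += 288 if sz == 128 else sz * 2
--     return chunks
-- ===== SOURCE B (Python) =====
-- from typing import List, Tuple
--
-- def _macro_w_tiles(w_in: int) -> List[Tuple[int, int, int]]:
--     if w_in <= 128:
--         return [(0, w_in, 0)]
--     # Only the last tile can be partial, so tile i always starts at 128*i with hint 288*i.
--     n = (w_in + 127) // 128
--     return [(i * 128, min(128, w_in - i * 128), 288 * i) for i in range(n)]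
-- ===== Notes on version B (the rewrite author's own statement) =====
-- stated objective: simpler
-- what changed: Replaces the while-loop that threads running start and hint accumulators by a closed-form comprehension that computes each tile directly from its index, exploiting that only the last tile can be partial so every hint is a fixed multiple of the index.
import Mathlib
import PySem

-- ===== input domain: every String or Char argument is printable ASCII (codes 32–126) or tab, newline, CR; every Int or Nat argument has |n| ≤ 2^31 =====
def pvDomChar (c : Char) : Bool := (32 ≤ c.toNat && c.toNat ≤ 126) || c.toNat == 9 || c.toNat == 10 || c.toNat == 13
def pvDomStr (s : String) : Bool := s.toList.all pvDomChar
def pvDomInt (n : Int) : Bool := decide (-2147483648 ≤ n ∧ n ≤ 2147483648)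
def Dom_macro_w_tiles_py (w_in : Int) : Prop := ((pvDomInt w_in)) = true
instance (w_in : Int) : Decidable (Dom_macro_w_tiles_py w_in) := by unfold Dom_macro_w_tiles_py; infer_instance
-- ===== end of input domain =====

-- B replaces A's while-loop with running start/hint accumulators by a closed-form
-- per-index comprehension over the tile count n = ceil(w_in/128); proved equal for all inputs.


-- ===== PORT A =====
-- the while-loop of A, state (start, hint); terminates because sz ≥ 1 while start < w_in
def macroWLoop (w start hint : Int) : List (Int × Int × Int) :=
  if _h : start < w then
    let sz := min 128 (w - start)
    (start, sz, hint) :: macroWLoop w (start + sz) (hint + if sz = 128 then 288 else sz * 2)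
  else []
termination_by (w - start).toNat
decreasing_by omega

def macro_w_tiles_py (w_in : Int) : List (Int × Int × Int) :=
  if w_in ≤ 128 then [(0, w_in, 0)]
  else macroWLoop w_in 0 0

-- ===== PORT B =====
def macro_w_tiles_py_alt (w_in : Int) : List (Int × Int × Int) :=
  if w_in ≤ 128 then [(0, w_in, 0)]
  else
    let n := PySem.Int.floordiv (w_in + 127) 128
    (PySem.List.pyRange 0 n 1).map (fun i => (i * 128, min 128 (w_in - i * 128), 288 * i))

-- ===== PRECONDITION & SPEC =====
def Spec_macro_w_tiles_py (w_in : Int) (out : List (Int × Int × Int)) : Prop := out = macro_w_tiles_py_alt w_in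
instance (w_in : Int) (out : List (Int × Int × Int)) : Decidable (Spec_macro_w_tiles_py w_in out) := by unfold Spec_macro_w_tiles_py; infer_instance

-- ===== CLAIM (what is proved, stated in full; the proofs are below) =====
def Claim_equal_macro_w_tiles_py : Prop := ∀ (w_in : Int), Dom_macro_w_tiles_py w_in → Spec_macro_w_tiles_py w_in (macro_w_tiles_py w_in)

-- ===== LEMMAS AND PROOFS =====

-- A's loop from state (128*i, 288*i), with exactly k tiles left, produces tiles i, i+1, …, i+k-1.
lemma macroWLoop_eq (w : Int) : ∀ (k i : Nat), 0 < k →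
    ((i : Int)) * 128 < w → w ≤ ((i : Int) + (k : Int)) * 128 → ((i : Int) + (k : Int) - 1) * 128 < w →
    macroWLoop w ((i : Int) * 128) (288 * (i : Int)) =
      (List.range k).map (fun j => (((i + j : Nat) : Int) * 128,
        min 128 (w - ((i + j : Nat) : Int) * 128), 288 * ((i + j : Nat) : Int))) := by
  intro k
  induction k with
  | zero => intro i hk; omega
  | succ k ih =>
    intro i _ hlt hub hlb
    rw [macroWLoop]
    simp only [hlt, dif_pos]
    rw [List.range_succ_eq_map, List.map_cons, List.map_map]
    by_cases hbig : 128 ≤ w - (i : Int) * 128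
    · have hsz : min 128 (w - (i : Int) * 128) = 128 := by omega
      rw [hsz]
      simp only [if_true, List.cons_eq_cons]
      refine ⟨by simp; omega, ?_⟩
      by_cases hmore : ((i : Int) + 1) * 128 < w
      · have hk : 0 < k := by
          by_contra h
          have : k = 0 := by omega
          subst this
          push_cast at hub
          omega
        have hrec := ih (i + 1) hk (by push_cast; omega) (by push_cast; push_cast at hub; omega)
          (by push_cast; push_cast at hlb; omega)
        have harg1 : ((i : Int)) * 128 + 128 = ((i + 1 : Nat) : Int) * 128 := by push_cast; ring
        have harg2 : 288 * (i : Int) + 288 = 288 * ((i + 1 : Nat) : Int) := by push_cast; ring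
        rw [harg1, harg2, hrec]
        apply List.map_congr_left
        intro j _
        have hij : i + 1 + j = i + j.succ := by omega
        simp [Function.comp, hij]
      · -- no more tiles: k must be 0
        have hk0 : k = 0 := by
          by_contra h
          have : (1 : Int) ≤ (k : Int) := by exact_mod_cast Nat.one_le_iff_ne_zero.mpr h
          omega
        subst hk0
        rw [macroWLoop]
        have hstop : ¬ ((i : Int) * 128 + 128 < w) := by omega
        simp [hstop]
    · -- partial (last) tile
      have hsz : min 128 (w - (i : Int) * 128) = w - (i : Int) * 128 := by omega
      have hk0 : k = 0 := by
        by_contra h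
        have : (1 : Int) ≤ (k : Int) := by exact_mod_cast Nat.one_le_iff_ne_zero.mpr h
        omega
      subst hk0
      rw [hsz, macroWLoop]
      have hstop : ¬ ((i : Int) * 128 + (w - (i : Int) * 128) < w) := by omega
      simp only [hstop, dif_neg, not_false_iff, List.cons_eq_cons]
      refine ⟨?_, rfl⟩
      simp
      omega

-- ===== VERDICT (by name: the statement is the Claim_ definition above) =====
theorem macro_w_tiles_py_spec : Claim_equal_macro_w_tiles_py := by
  intro w _
  unfold Spec_macro_w_tiles_py macro_w_tiles_py macro_w_tiles_py_alt
  by_cases hle : w ≤ 128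
  · simp [hle]
  · simp only [hle, if_false]
    have hw : 128 < w := by omega
    set n : Int := PySem.Int.floordiv (w + 127) 128 with hn
    have hnb : n * 128 ≤ w + 127 ∧ w + 127 < (n + 1) * 128 :=
      (PySem.Int.floordiv_eq_iff_of_pos (by omega)).mp hn.symm
    have hn2 : (2 : Int) ≤ n := by omega
    have hnn : n = ((n.toNat : Nat) : Int) := by omega
    rw [hnn, PySem.List.pyRange_zero_natCast, List.map_map]
    have h0 := macroWLoop_eq w n.toNat 0 (by omega)
      (by simp; omega) (by push_cast; omega) (by push_cast; omega)
    simp only [Nat.cast_zero, zero_mul, mul_zero] at h0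
    rw [h0]
    apply List.map_congr_left
    intro j _
    simp [Function.comp]
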